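-- pv_equiv track=rewrite | github.com/falloonaugustus/BoundedMinimumSpanningTree | bdmst.py | returnEdges
-- ===== SOURCE A (Python) =====
-- def returnEdges(nodeEdges):
--
--     output = []
--
--     for i in range(len(nodeEdges)):
--
--         for j in range(len(nodeEdges[i])):
--
--             if nodeEdges[i][j]+1 not in output:
--                 output.append(nodeEdges[i][j] + 1)
--
--     output = sorted(output)
--
--     return output
-- ===== SOURCE B (Python) =====
-- def returnEdges(nodeEdges):
--     # Collect all values+1 (with duplicates), sort, then dedup adjacent.
--     vals = []
--     for row in nodeEdges:
--         for v in row: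
--             vals.append(v + 1)
--     vals = sorted(vals)
--     output = []
--     for v in vals:
--         if not output or output[-1] != v:
--             output.append(v)
--     return output
-- ===== Notes on version B (the rewrite author's own statement) =====
-- stated objective: faster
-- what changed: Collects all values+1 without any membership test, sorts the full list, and deduplicates in one linear pass over adjacent elements, instead of A's quadratic not-in-list check during collection.
import Mathlib
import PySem

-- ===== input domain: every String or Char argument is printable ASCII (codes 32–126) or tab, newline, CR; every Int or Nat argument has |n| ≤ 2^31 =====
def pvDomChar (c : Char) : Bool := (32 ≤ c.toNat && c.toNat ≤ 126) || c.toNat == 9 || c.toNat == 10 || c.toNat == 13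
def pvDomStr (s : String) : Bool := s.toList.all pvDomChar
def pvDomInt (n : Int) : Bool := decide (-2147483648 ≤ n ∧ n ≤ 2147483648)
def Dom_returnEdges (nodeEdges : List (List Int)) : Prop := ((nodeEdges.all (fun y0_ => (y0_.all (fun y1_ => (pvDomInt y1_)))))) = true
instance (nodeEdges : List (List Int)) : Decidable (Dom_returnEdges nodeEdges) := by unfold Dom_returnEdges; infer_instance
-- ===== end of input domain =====

-- B replaces A's quadratic membership-checked collection by collect-all, sort, then a
-- linear adjacent-deduplication pass (objective: faster).

-- ===== PORT A =====
-- for i / for j with membership-checked append, then sorted(output)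
def returnEdges (nodeEdges : List (List Int)) : List Int :=
  let output : List Int :=
    nodeEdges.foldl (fun out row =>
      row.foldl (fun out v => if (v + 1) ∈ out then out else out ++ [v + 1]) out) []
  PySem.List.sorted output (fun x => x) false

-- ===== PORT B =====
-- collect all v+1 (duplicates kept), sort, then append each element only when it is not
-- already the last appended one ('not output or output[-1] != v' = getLast? ≠ some v)
def returnEdges_alt (nodeEdges : List (List Int)) : List Int :=
  let vals : List Int :=
    nodeEdges.foldl (fun acc row => row.foldl (fun acc v => acc ++ [v + 1]) acc) []
  let s := PySem.List.sorted vals (fun x => x) false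
  s.foldl (fun out v => if out.getLast? = some v then out else out ++ [v]) []

-- ===== PRECONDITION & SPEC =====
def Spec_returnEdges (nodeEdges : List (List Int)) (out : List Int) : Prop := out = returnEdges_alt nodeEdges
instance (nodeEdges : List (List Int)) (out : List Int) : Decidable (Spec_returnEdges nodeEdges out) := by unfold Spec_returnEdges; infer_instance

-- ===== CLAIM (what is proved, stated in full; the proofs are below) =====
def Claim_equal_returnEdges : Prop := ∀ (nodeEdges : List (List Int)), Dom_returnEdges nodeEdges → Spec_returnEdges nodeEdges (returnEdges nodeEdges)

-- ===== LEMMAS AND PROOFS =====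

-- A's inner loop: membership and nodup
theorem mem_afold1 (row : List Int) (acc : List Int) (x : Int) :
    x ∈ row.foldl (fun out v => if (v + 1) ∈ out then out else out ++ [v + 1]) acc ↔
      x ∈ acc ∨ x ∈ row.map (· + 1) := by
  induction row generalizing acc with
  | nil => simp
  | cons v t ih =>
    by_cases h : (v + 1) ∈ acc
    · rw [List.foldl_cons, if_pos h, ih]
      simp only [List.map_cons, List.mem_cons]
      constructor
      · rintro (h1 | h1)
        · exact Or.inl h1
        · exact Or.inr (Or.inr h1)
      · rintro (h1 | h1 | h1)
        · exact Or.inl h1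
        · exact Or.inl (h1 ▸ h)
        · exact Or.inr h1
    · rw [List.foldl_cons, if_neg h, ih]
      simp [List.mem_append, or_assoc]

theorem nodup_afold1 (row : List Int) (acc : List Int) (h : acc.Nodup) :
    (row.foldl (fun out v => if (v + 1) ∈ out then out else out ++ [v + 1]) acc).Nodup := by
  induction row generalizing acc with
  | nil => simpa
  | cons v t ih =>
    by_cases hm : (v + 1) ∈ acc
    · simpa [List.foldl_cons, hm] using ih acc h
    · rw [List.foldl_cons, if_neg hm]
      refine ih _ ?_
      refine h.append (List.nodup_singleton _) ?_
      intro a ha hb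
      simp at hb
      exact hm (hb ▸ ha)

theorem mem_afold (l : List (List Int)) (acc : List Int) (x : Int) :
    x ∈ l.foldl (fun out row =>
        row.foldl (fun out v => if (v + 1) ∈ out then out else out ++ [v + 1]) out) acc ↔
      x ∈ acc ∨ x ∈ l.flatMap (fun row => row.map (· + 1)) := by
  induction l generalizing acc with
  | nil => simp
  | cons r t ih => simp [List.foldl_cons, ih, mem_afold1, or_assoc]

theorem nodup_afold (l : List (List Int)) (acc : List Int) (h : acc.Nodup) :
    (l.foldl (fun out row =>
        row.foldl (fun out v => if (v + 1) ∈ out then out else out ++ [v + 1]) out) acc).Nodup := by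
  induction l generalizing acc with
  | nil => simpa
  | cons r t ih => exact ih _ (nodup_afold1 r acc h)

-- B's collection loop flattens
theorem bfold1 (row : List Int) (acc : List Int) :
    row.foldl (fun acc v => acc ++ [v + 1]) acc = acc ++ row.map (· + 1) := by
  induction row generalizing acc with
  | nil => simp
  | cons v t ih => simp [List.foldl_cons, ih]

theorem bfold (l : List (List Int)) (acc : List Int) :
    l.foldl (fun acc row => row.foldl (fun acc v => acc ++ [v + 1]) acc) acc =
      acc ++ l.flatMap (fun row => row.map (· + 1)) := by
  induction l generalizing acc with
  | nil => simp
  | cons r t ih => rw [List.foldl_cons, bfold1, ih, List.flatMap_cons, List.append_assoc]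

-- B's adjacent-dedup pass on a ≤-sorted list: strictly increasing, same members
theorem dedup_fold (s acc : List Int)
    (hs : s.Pairwise (· ≤ ·)) (hacc : acc.Pairwise (· < ·))
    (hlast : ∀ a ∈ acc, ∀ l, acc.getLast? = some l → a ≤ l)
    (hle : ∀ a ∈ acc, ∀ v ∈ s, a ≤ v) :
    (s.foldl (fun out v => if out.getLast? = some v then out else out ++ [v]) acc).Pairwise (· < ·) ∧
      (∀ x, x ∈ s.foldl (fun out v => if out.getLast? = some v then out else out ++ [v]) acc ↔
        x ∈ acc ∨ x ∈ s) := by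
  induction s generalizing acc with
  | nil => exact ⟨hacc, by simp⟩
  | cons v t ih =>
    rcases List.pairwise_cons.mp hs with ⟨hvt, ht⟩
    by_cases h : acc.getLast? = some v
    · have hvmem : v ∈ acc := List.mem_of_getLast? h
      have hrec := ih acc ht hacc hlast (fun a ha w hw => le_trans (hlast a ha v h) (hvt w hw))
      refine ⟨by rw [List.foldl_cons, if_pos h]; exact hrec.1, fun x => ?_⟩
      rw [List.foldl_cons, if_pos h, hrec.2 x]
      constructor
      · rintro (h1 | h1)
        · exact Or.inl h1
        · exact Or.inr (List.mem_cons_of_mem _ h1)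
      · rintro (h1 | h1)
        · exact Or.inl h1
        · rcases List.mem_cons.mp h1 with h2 | h2
          · exact Or.inl (h2 ▸ hvmem)
          · exact Or.inr h2
    · have hlt : ∀ a ∈ acc, a < v := by
        intro a ha
        have hne : acc ≠ [] := fun hnil => by simp [hnil] at ha
        cases hll : acc.getLast? with
        | none => exact absurd (List.getLast?_eq_none_iff.mp hll) hne
        | some l =>
          have hal : a ≤ l := hlast a ha l hll
          have hlv : l ≤ v := hle l (List.mem_of_getLast? hll) v (by simp)
          have hnev : l ≠ v := fun he => h (he ▸ hll)
          exact lt_of_le_of_lt hal (lt_of_le_of_ne hlv hnev)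
      have hacc' : (acc ++ [v]).Pairwise (· < ·) := by
        rw [List.pairwise_append]
        exact ⟨hacc, List.pairwise_singleton _ _, fun a ha b hb => by
          simp at hb; exact hb ▸ hlt a ha⟩
      have hlast' : ∀ a ∈ acc ++ [v], ∀ l, (acc ++ [v]).getLast? = some l → a ≤ l := by
        intro a ha l hl
        simp [List.getLast?_append] at hl
        subst hl
        rcases List.mem_append.mp ha with h1 | h1
        · exact le_of_lt (hlt a h1)
        · simp at h1; exact h1.le
      have hle' : ∀ a ∈ acc ++ [v], ∀ w ∈ t, a ≤ w := by
        intro a ha w hw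
        rcases List.mem_append.mp ha with h1 | h1
        · exact hle a h1 w (List.mem_cons_of_mem _ hw)
        · simp at h1; exact h1 ▸ hvt w hw
      have hrec := ih (acc ++ [v]) ht hacc' hlast' hle'
      refine ⟨by rw [List.foldl_cons, if_neg h]; exact hrec.1, fun x => ?_⟩
      rw [List.foldl_cons, if_neg h, hrec.2 x]
      simp only [List.mem_append, List.mem_cons]
      tauto

-- ===== VERDICT (by name: the statement is the Claim_ definition above) =====
theorem returnEdges_spec : Claim_equal_returnEdges := by
  intro nodeEdges _
  unfold Spec_returnEdges returnEdges returnEdges_alt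
  set m := nodeEdges.flatMap (fun row => row.map (· + 1)) with hm
  set colA := nodeEdges.foldl (fun out row =>
      row.foldl (fun out v => if (v + 1) ∈ out then out else out ++ [v + 1]) out) [] with hcolA
  have hAmem : ∀ x, x ∈ colA ↔ x ∈ m := by
    intro x
    rw [hcolA, mem_afold, hm]
    simp
  have hAnodup : colA.Nodup := nodup_afold nodeEdges [] List.nodup_nil
  have hvals : nodeEdges.foldl (fun acc row => row.foldl (fun acc v => acc ++ [v + 1]) acc) [] = m := by
    simpa using bfold nodeEdges []
  rw [hvals]
  set s := PySem.List.sorted m (fun x => x) false with hs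
  have hsp : s.Pairwise (· ≤ ·) := PySem.List.sorted_pairwise m (fun x => x)
  have hd := dedup_fold s [] hsp List.Pairwise.nil (by simp) (by simp)
  set d := s.foldl (fun out v => if out.getLast? = some v then out else out ++ [v]) [] with hdd
  have hdlt : d.Pairwise (· < ·) := hd.1
  have hdmem : ∀ x, x ∈ d ↔ x ∈ colA := by
    intro x
    rw [hAmem x, ← PySem.List.mem_sorted (xs := m) (key := fun x => x) (rev := false), ← hs]
    simpa using hd.2 x
  have hdnodup : d.Nodup := hdlt.imp ne_of_lt
  have hperm : d.Perm colA := (List.perm_ext_iff_of_nodup hdnodup hAnodup).mpr hdmem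
  exact PySem.List.sorted_eq_of_perm_of_pairwise_lt colA d (fun x => x) hperm hdlt
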